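-- pv_equiv track=rewrite | github.com/tonylenc/JetBrainsProjects | Domino.py | who_starts
-- ===== SOURCE A (Python) =====
-- def who_starts(computer, player):
--     mx = [-1, -1]
--     giver = None
--
--     for i in computer:
--         if i[0] == i[1] and i[0] > mx[0]:
--             mx = i
--             giver = "computer"
--
--     for i in player:
--         if i[0] == i[1] and i[0] > mx[0]:
--             mx = i
--             giver = "player"
--
--     return giver, mx
-- ===== SOURCE B (Python) =====
-- def who_starts(computer, player):
--     # Collect every playable double as (value, owner, domino); computer first so max() (first maximal) gives it ties.
--     candidates = [(d[0], owner, d)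
--                   for owner, hand in (("computer", computer), ("player", player))
--                   for d in hand
--                   if d[0] == d[1] and d[0] > -1]
--     if not candidates:
--         return None, [-1, -1]
--     _, owner, domino = max(candidates, key=lambda t: t[0])
--     return owner, domino
-- ===== Notes on version B (the rewrite author's own statement) =====
-- stated objective: alternative
-- what changed: Replaces A's two scan-and-mutate loops over a (giver, mx) state with a collect-then-reduce shape: build one list of (value, owner, domino) candidates (computer's playable doubles first, then player's) and pick the first maximal by value with a single max().
import Mathlib
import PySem

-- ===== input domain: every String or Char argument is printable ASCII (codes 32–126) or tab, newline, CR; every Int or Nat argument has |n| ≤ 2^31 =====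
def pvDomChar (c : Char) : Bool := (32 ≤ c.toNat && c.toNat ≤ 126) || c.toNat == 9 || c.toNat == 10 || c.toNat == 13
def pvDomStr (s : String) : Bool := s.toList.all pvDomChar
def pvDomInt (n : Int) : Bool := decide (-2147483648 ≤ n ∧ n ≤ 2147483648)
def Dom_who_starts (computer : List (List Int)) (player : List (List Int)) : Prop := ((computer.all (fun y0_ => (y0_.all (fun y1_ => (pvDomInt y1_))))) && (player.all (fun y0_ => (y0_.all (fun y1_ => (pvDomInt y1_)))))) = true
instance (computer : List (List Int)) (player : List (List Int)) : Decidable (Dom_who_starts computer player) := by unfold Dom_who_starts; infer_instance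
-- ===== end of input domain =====

-- B replaces A's two scan-and-mutate loops with collect-candidates-then-max (alternative decomposition, same cost);
-- equivalence is about the return value only (neither version mutates its arguments).

-- ===== PORT A =====
-- one loop iteration of A (for either hand, lab = "computer" / "player")
def stepA (lab : String) (s : Option String × List Int) (i : List Int) : Option String × List Int :=
  if PySem.List.pyGetD i 0 0 = PySem.List.pyGetD i 1 0 ∧ PySem.List.pyGetD i 0 0 > PySem.List.pyGetD s.2 0 0
  then (some lab, i) else s

def who_starts (computer : List (List Int)) (player : List (List Int)) : Option String × List Int :=
  player.foldl (stepA "player") (computer.foldl (stepA "computer") ((none : Option String), [(-1 : Int), -1]))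

-- ===== PORT B =====
-- the playable doubles of one hand, as (value, owner, domino)
def candDoubles (owner : String) (hand : List (List Int)) : List (Int × String × List Int) :=
  (hand.filter (fun d => decide (PySem.List.pyGetD d 0 0 = PySem.List.pyGetD d 1 0) &&
                         decide (PySem.List.pyGetD d 0 0 > -1))).map
    (fun d => (PySem.List.pyGetD d 0 0, owner, d))

def who_starts_alt (computer : List (List Int)) (player : List (List Int)) : Option String × List Int :=
  match PySem.List.max? (candDoubles "computer" computer ++ candDoubles "player" player) (fun t => t.1) with
  | none => (none, [-1, -1])
  | some t => (some t.2.1, t.2.2)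

-- ===== PRECONDITION & SPEC =====
-- Pre_ excludes only inputs on which Python A raises IndexError (a domino with fewer than 2 pips accessed by i[0]/i[1]).
def Pre_who_starts (computer : List (List Int)) (player : List (List Int)) : Prop :=
  ∀ d ∈ computer ++ player, 2 ≤ d.length
instance (computer : List (List Int)) (player : List (List Int)) : Decidable (Pre_who_starts computer player) := by unfold Pre_who_starts; infer_instance
def pvWitness_who_starts : List (List Int) × List (List Int) := ([[2, 2], [1, 3]], [[3, 3]])

def Spec_who_starts (computer : List (List Int)) (player : List (List Int)) (out : Option String × List Int) : Prop := out = who_starts_alt computer player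
instance (computer : List (List Int)) (player : List (List Int)) (out : Option String × List Int) : Decidable (Spec_who_starts computer player out) := by unfold Spec_who_starts; infer_instance

-- ===== CLAIM (what is proved, stated in full; the proofs are below) =====
def Claim_equal_who_starts : Prop := ∀ (computer : List (List Int)) (player : List (List Int)), Dom_who_starts computer player → Pre_who_starts computer player → Spec_who_starts computer player (who_starts computer player)

-- ===== LEMMAS AND PROOFS =====

-- the fold inside PySem.List.max? with key (fun t => t.1)
def pvMacc (acc : Option (Int × String × List Int)) (x : Int × String × List Int) :
    Option (Int × String × List Int) :=
  match acc with
  | none => some x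
  | some m => if m.1 < x.1 then some x else some m

-- A-state represented by a max?-accumulator
def pvRep (acc : Option (Int × String × List Int)) : Option String × List Int :=
  match acc with
  | none => ((none : Option String), [(-1 : Int), -1])
  | some t => (some t.2.1, t.2.2)

-- accumulator invariant: stored value is the domino's first pip, and it is playable
def pvGood (t : Int × String × List Int) : Prop :=
  t.1 = PySem.List.pyGetD t.2.2 0 0 ∧ -1 < t.1

def pvInv (acc : Option (Int × String × List Int)) : Prop :=
  ∀ t, acc = some t → pvGood t

theorem cand_good (owner : String) (hand : List (List Int)) :
    ∀ y ∈ candDoubles owner hand, pvGood y := by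
  intro y hy
  simp only [candDoubles, List.mem_map, List.mem_filter] at hy
  obtain ⟨d, ⟨_, hd⟩, rfl⟩ := hy
  simp only [Bool.and_eq_true, decide_eq_true_eq] at hd
  exact ⟨rfl, by omega⟩

theorem inv_fold (cs : List (Int × String × List Int)) :
    ∀ acc, pvInv acc → (∀ y ∈ cs, pvGood y) → pvInv (cs.foldl pvMacc acc) := by
  induction cs with
  | nil => intro acc h _; simpa using h
  | cons c t ih =>
    intro acc hacc hcs
    have hc : pvGood c := hcs c (by simp)
    have ht : ∀ y ∈ t, pvGood y := fun y hy => hcs y (by simp [hy])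
    simp only [List.foldl_cons]
    apply ih _ _ ht
    intro u hu
    cases acc with
    | none => simp only [pvMacc] at hu; cases hu; exact hc
    | some m =>
      have hm : pvGood m := hacc m rfl
      simp only [pvMacc] at hu
      split at hu <;> (cases hu; first | exact hc | exact hm)

theorem scan_eq (hand : List (List Int)) (lab : String) :
    ∀ acc, pvInv acc →
      hand.foldl (stepA lab) (pvRep acc) = pvRep ((candDoubles lab hand).foldl pvMacc acc) := by
  induction hand with
  | nil => intro acc _; simp [candDoubles]
  | cons d rest ih =>
    intro acc hacc
    by_cases hcand : PySem.List.pyGetD d 0 0 = PySem.List.pyGetD d 1 0 ∧ -1 < PySem.List.pyGetD d 0 0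
    · -- d is a playable double: it heads the candidate list
      have hp : (decide (PySem.List.pyGetD d 0 0 = PySem.List.pyGetD d 1 0) &&
                 decide (PySem.List.pyGetD d 0 0 > -1)) = true := by
        simp only [Bool.and_eq_true, decide_eq_true_eq]
        exact ⟨hcand.1, hcand.2⟩
      have hcl : candDoubles lab (d :: rest)
          = (PySem.List.pyGetD d 0 0, lab, d) :: candDoubles lab rest := by
        unfold candDoubles
        rw [List.filter_cons, if_pos hp]
        rfl
      rw [hcl]
      cases acc with
      | none =>
        have hbase : PySem.List.pyGetD ([(-1 : Int), -1] : List Int) 0 0 = -1 := by decide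
        have hstep : stepA lab (pvRep none) d = pvRep (some (PySem.List.pyGetD d 0 0, lab, d)) := by
          simp only [stepA, pvRep, hbase]
          rw [if_pos ⟨hcand.1, hcand.2⟩]
        simp only [List.foldl_cons, hstep, pvMacc]
        exact ih _ (by intro t ht; cases ht; exact ⟨rfl, hcand.2⟩)
      | some m =>
        have hm : pvGood m := hacc m rfl
        have hv : PySem.List.pyGetD m.2.2 0 0 = m.1 := hm.1.symm
        by_cases hlt : m.1 < PySem.List.pyGetD d 0 0
        · have hstep : stepA lab (pvRep (some m)) d
              = pvRep (some (PySem.List.pyGetD d 0 0, lab, d)) := by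
            simp only [stepA, pvRep, hv]
            rw [if_pos ⟨hcand.1, hlt⟩]
          simp only [List.foldl_cons, hstep, pvMacc, if_pos hlt]
          exact ih _ (by intro t ht; cases ht; exact ⟨rfl, hcand.2⟩)
        · have hstep : stepA lab (pvRep (some m)) d = pvRep (some m) := by
            simp only [stepA, pvRep, hv]
            rw [if_neg (by rintro ⟨-, hgt⟩; exact hlt hgt)]
          simp only [List.foldl_cons, hstep, pvMacc, if_neg hlt]
          exact ih _ hacc
    · -- d is not a playable double: it is filtered out and A's guard cannot fire
      have hval : -1 ≤ PySem.List.pyGetD (pvRep acc).2 0 0 := by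
        cases acc with
        | none => decide
        | some m =>
          have hm : pvGood m := hacc m rfl
          simp only [pvRep]
          rw [hm.1.symm] at *
          exact le_of_lt hm.2
      have hcl : candDoubles lab (d :: rest) = candDoubles lab rest := by
        by_cases h1 : PySem.List.pyGetD d 0 0 = PySem.List.pyGetD d 1 0
        · have hle : ¬ (-1 < PySem.List.pyGetD d 0 0) := fun h => hcand ⟨h1, h⟩
          unfold candDoubles
          rw [List.filter_cons, decide_eq_false hle]
          simp
        · unfold candDoubles
          rw [List.filter_cons, decide_eq_false h1]
          simp
      have hstep : stepA lab (pvRep acc) d = pvRep acc := by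
        by_cases h1 : PySem.List.pyGetD d 0 0 = PySem.List.pyGetD d 1 0
        · have hle : ¬ (-1 < PySem.List.pyGetD d 0 0) := fun h => hcand ⟨h1, h⟩
          simp only [stepA]
          rw [if_neg (by rintro ⟨-, hgt⟩; omega)]
        · simp only [stepA]
          rw [if_neg (by rintro ⟨h, -⟩; exact h1 h)]
      rw [hcl, List.foldl_cons, hstep]
      exact ih _ hacc

theorem alt_eq_rep (computer player : List (List Int)) :
    who_starts_alt computer player
      = pvRep ((candDoubles "computer" computer ++ candDoubles "player" player).foldl pvMacc none) := by
  have hmax : PySem.List.max? (candDoubles "computer" computer ++ candDoubles "player" player)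
      (fun t => t.1)
      = (candDoubles "computer" computer ++ candDoubles "player" player).foldl pvMacc none := by
    unfold PySem.List.max?
    congr 1
    funext acc x
    cases acc <;> rfl
  unfold who_starts_alt
  rw [hmax]
  cases (candDoubles "computer" computer ++ candDoubles "player" player).foldl pvMacc none with
  | none => rfl
  | some t => rfl

-- ===== VERDICT (by name: the statement is the Claim_ definition above) =====
theorem who_starts_spec : Claim_equal_who_starts := by
  intro computer player _ _
  unfold Spec_who_starts
  rw [alt_eq_rep, List.foldl_append]
  have h1 : computer.foldl (stepA "computer") ((none : Option String), [(-1 : Int), -1])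
      = pvRep ((candDoubles "computer" computer).foldl pvMacc none) := by
    have := scan_eq computer "computer" none (by intro t ht; cases ht)
    simpa [pvRep] using this
  have hinv : pvInv ((candDoubles "computer" computer).foldl pvMacc none) :=
    inv_fold _ none (by intro t ht; cases ht) (cand_good _ _)
  unfold who_starts
  rw [h1]
  exact scan_eq player "player" _ hinv
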